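-- pv_equiv track=rewrite | github.com/Amirshox/ProblemSolving | binarysearch.com/Stuck-Keyboard.py | solve
-- ===== SOURCE A (Python) =====
-- def solve(typed, target):
--     lt = len(target)
--     j = 0
--     prev = ""
--     for t in typed:
--         if j < lt and t == target[j]:
--             j += 1
--         elif t != prev:
--             return False
--         prev = t
--     return j == lt
-- ===== SOURCE B (Python) =====
-- def _rle(s):
--     groups = []
--     i = 0
--     n = len(s)
--     while i < n:
--         j = i + 1
--         while j < n and s[j] == s[i]:
--             j += 1
--         groups.append((s[i], j - i))
--         i = j
--     return groups
--
--
-- def solve(typed, target):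
--     gt = _rle(typed)
--     gg = _rle(target)
--     if len(gt) != len(gg):
--         return False
--     for (c1, n1), (c2, n2) in zip(gt, gg):
--         if c1 != c2 or n1 < n2:
--             return False
--     return True
-- ===== Notes on version B (the rewrite author's own statement) =====
-- stated objective: alternative
-- what changed: Replaced the interleaved greedy two-pointer scan (target index + previous-char state) by run-length-encoding both strings into (char, count) group lists and a single pairwise comparison requiring equal group characters and typed count >= target count.
import Mathlib
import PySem

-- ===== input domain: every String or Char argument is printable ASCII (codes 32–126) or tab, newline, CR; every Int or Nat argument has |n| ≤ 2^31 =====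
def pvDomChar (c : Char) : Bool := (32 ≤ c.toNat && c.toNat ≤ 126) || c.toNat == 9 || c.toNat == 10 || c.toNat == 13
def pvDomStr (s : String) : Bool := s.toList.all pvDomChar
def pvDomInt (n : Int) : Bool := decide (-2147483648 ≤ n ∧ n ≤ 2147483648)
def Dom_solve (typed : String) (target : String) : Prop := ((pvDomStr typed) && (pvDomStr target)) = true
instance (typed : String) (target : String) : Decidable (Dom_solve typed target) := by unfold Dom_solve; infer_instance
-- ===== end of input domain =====

-- B re-implements the stuck-keyboard check by run-length-encoding both strings and comparing
-- the group lists pairwise (same decomposition cost, different algorithm; return value only).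

-- ===== PORT A =====
-- A's for-loop over typed with state (j, prev); early 'return False' = the 'false' branches.
def solveLoopA (tgt : List Char) (lt : Int) : List Char → Int → Option Char → Bool
  | [], j, _ => j == lt
  | t :: rest, j, prev =>
    if j < lt ∧ PySem.List.pyGet? tgt j = some t then
      solveLoopA tgt lt rest (j + 1) (some t)
    else if some t ≠ prev then
      false
    else
      solveLoopA tgt lt rest j (some t)

def solve (typed : String) (target : String) : Bool :=
  solveLoopA target.toList (PySem.Str.len target) typed.toList 0 none

-- ===== PORT B =====
-- Source B's _rle: scan the run of the first char (the inner while), emit (char, run length), recurse on the rest.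
def rleB : List Char → List (Char × Nat)
  | [] => []
  | c :: rest =>
    (c, 1 + (rest.takeWhile (· == c)).length) :: rleB (rest.dropWhile (· == c))
  termination_by l => l.length
  decreasing_by
    have := List.length_dropWhile_le (· == c) rest
    simp only [List.length_cons]
    omega

-- Source B's length check followed by the zip loop.
def solve_alt (typed : String) (target : String) : Bool :=
  let gt := rleB typed.toList
  let gg := rleB target.toList
  if gt.length ≠ gg.length then false
  else (gt.zip gg).all fun p => p.1.1 == p.2.1 && decide (p.2.2 ≤ p.1.2)

-- ===== PRECONDITION & SPEC =====
def Spec_solve (typed : String) (target : String) (out : Bool) : Prop := out = solve_alt typed target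
instance (typed : String) (target : String) (out : Bool) : Decidable (Spec_solve typed target out) := by unfold Spec_solve; infer_instance

-- ===== CLAIM (what is proved, stated in full; the proofs are below) =====
def Claim_equal_solve : Prop := ∀ (typed : String) (target : String), Dom_solve typed target → Spec_solve typed target (solve typed target)

-- ===== LEMMAS AND PROOFS =====

-- A's loop with the target index replaced by the remaining target suffix.
def chk : List Char → List Char → Option Char → Bool
  | [], gs, _ => gs.isEmpty
  | t :: ts, g :: gs, prev =>
    if g = t then chk ts gs (some t)
    else if prev = some t then chk ts (g :: gs) (some t)
    else false
  | t :: ts, [], prev =>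
    if prev = some t then chk ts [] (some t) else false

-- paired-recursion form of B's comparison
def cmp2 : List (Char × Nat) → List (Char × Nat) → Bool
  | [], [] => true
  | (c1, n1) :: r1, (c2, n2) :: r2 => c1 == c2 && decide (n2 ≤ n1) && cmp2 r1 r2
  | _, _ => false

-- leading-run length / rest with respect to the previous char (none = no run)
def cnt : Option Char → List Char → Nat
  | none, _ => 0
  | some c, l => (l.takeWhile (· == c)).length

def drp : Option Char → List Char → List Char
  | none, l => l
  | some c, l => l.dropWhile (· == c)

lemma solveLoopA_eq_chk (tgt : List Char) :
    ∀ (ts : List Char) (j : Nat) (prev : Option Char), j ≤ tgt.length →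
      solveLoopA tgt (tgt.length : Int) ts (j : Int) prev = chk ts (tgt.drop j) prev := by
  intro ts
  induction ts with
  | nil =>
    intro j prev hj
    rw [solveLoopA, chk]
    by_cases h : j = tgt.length
    · simp [h]
    · have h1 : ((j : Int) == (tgt.length : Int)) = false := by
        rw [beq_eq_false_iff_ne]; omega
      have h2 : (tgt.drop j).isEmpty = false := by
        rw [List.isEmpty_eq_false_iff]
        intro he; rw [List.drop_eq_nil_iff] at he; omega
      rw [h1, h2]
  | cons t ts ih =>
    intro j prev hj
    by_cases hjlt : j < tgt.length
    · have hd : tgt.drop j = tgt[j] :: tgt.drop (j + 1) := (List.getElem_cons_drop hjlt).symm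
      rw [hd]
      by_cases ht : tgt[j] = t
      · have hcond : ((j : Int) < (tgt.length : Int) ∧ PySem.List.pyGet? tgt (j : Int) = some t) := by
          refine ⟨by exact_mod_cast hjlt, ?_⟩
          simp [List.getElem?_eq_getElem hjlt, ht]
        rw [solveLoopA, if_pos hcond, chk, if_pos ht]
        have : (j : Int) + 1 = ((j + 1 : Nat) : Int) := by push_cast; ring
        rw [this, ih (j + 1) (some t) (by omega)]
      · have hcond : ¬ ((j : Int) < (tgt.length : Int) ∧ PySem.List.pyGet? tgt (j : Int) = some t) := by
          simp [List.getElem?_eq_getElem hjlt]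
          intro _; exact fun h => ht h
        rw [solveLoopA, if_neg hcond, chk, if_neg ht]
        by_cases hp : prev = some t
        · rw [if_neg (by simp [hp]), if_pos hp, ih j (some t) (by omega), hd]
        · rw [if_pos (by simp; exact fun h => hp h.symm), if_neg hp]
    · have hje : j = tgt.length := by omega
      have hd : tgt.drop j = [] := by simp [hje]
      have hcond : ¬ ((j : Int) < (tgt.length : Int) ∧ PySem.List.pyGet? tgt (j : Int) = some t) := by
        intro hc; have := hc.1; omega
      rw [hd, solveLoopA, if_neg hcond, chk]
      by_cases hp : prev = some t
      · rw [if_neg (by simp [hp]), if_pos hp, ih j (some t) (by omega), hd]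
      · rw [if_pos (by simp; exact fun h => hp h.symm), if_neg hp]

lemma cmp2_eq_zipall : ∀ (gt gg : List (Char × Nat)),
    (if gt.length ≠ gg.length then false
     else (gt.zip gg).all fun p => p.1.1 == p.2.1 && decide (p.2.2 ≤ p.1.2)) = cmp2 gt gg := by
  intro gt
  induction gt with
  | nil => intro gg; cases gg <;> simp [cmp2]
  | cons x gt ih =>
    intro gg
    cases gg with
    | nil => simp [cmp2]
    | cons y gg =>
      obtain ⟨c1, n1⟩ := x
      obtain ⟨c2, n2⟩ := y
      by_cases h : gt.length = gg.length
      · simp [cmp2, h, ← ih gg, Bool.and_assoc]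
      · simp [cmp2, h, ← ih gg]

lemma chk_eq_cmp2 (ts : List Char) : ∀ (gs : List Char) (prev : Option Char),
    chk ts gs prev =
      if cnt prev gs ≤ cnt prev ts then cmp2 (rleB (drp prev ts)) (rleB (drp prev gs)) else false := by
  induction ts with
  | nil =>
    intro gs prev
    cases prev with
    | none => cases gs <;> simp [chk, cnt, drp, rleB, cmp2]
    | some c =>
      cases gs with
      | nil => simp [chk, cnt, drp, rleB, cmp2]
      | cons g gs' =>
        by_cases hg : g = c
        · simp [chk, cnt, hg]
        · simp [chk, cnt, drp, hg, rleB, cmp2]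
  | cons t ts ih =>
    intro gs prev
    cases gs with
    | nil =>
      rw [chk]
      cases prev with
      | none => simp [cnt, drp, rleB, cmp2]
      | some c =>
        by_cases hc : c = t
        · rw [if_pos (by rw [hc]), ih [] (some t)]
          subst hc
          simp [cnt, drp, rleB]
        · have htc : ¬ t = c := fun h => hc h.symm
          rw [if_neg (by simp [hc])]
          simp [cnt, drp, rleB, cmp2, htc]
    | cons g gs' =>
      rw [chk]
      by_cases hg : g = t
      · rw [if_pos hg, ih gs' (some t)]
        subst hg
        cases prev with
        | none =>
          by_cases hba : (gs'.takeWhile (· == g)).length ≤ (ts.takeWhile (· == g)).length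
          · simp [cnt, drp, rleB, cmp2, hba]
          · simp [cnt, drp, rleB, cmp2, hba]
        | some c =>
          by_cases hc : c = g
          · subst hc
            by_cases hba : (gs'.takeWhile (· == c)).length ≤ (ts.takeWhile (· == c)).length
            · simp [cnt, drp, hba]
            · simp [cnt, hba]
          · have hgc : ¬ g = c := fun h => hc h.symm
            by_cases hba : (gs'.takeWhile (· == g)).length ≤ (ts.takeWhile (· == g)).length
            · simp [cnt, drp, rleB, cmp2, hgc, hba]
            · simp [cnt, drp, rleB, cmp2, hgc, hba]
      · have hgt : ¬ t = g := fun h => hg h.symm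
        cases prev with
        | none =>
          rw [if_neg hg, if_neg (by simp)]
          simp [cnt, drp, rleB, cmp2, hgt]
        | some c =>
          by_cases hc : c = t
          · rw [if_neg hg, if_pos (by rw [hc]), ih (g :: gs') (some t)]
            subst hc
            simp [cnt, drp, rleB, hg]
          · rw [if_neg hg, if_neg (by simp [hc])]
            by_cases hgc : g = c
            · subst hgc
              simp [cnt, hgt]
            · have htc : ¬ t = c := fun h => hc h.symm
              simp [cnt, drp, rleB, cmp2, hgc, hgt, htc]

-- ===== VERDICT (by name: the statement is the Claim_ definition above) =====
theorem solve_spec : Claim_equal_solve := by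
  intro typed target _
  unfold Spec_solve solve solve_alt
  rw [PySem.Str.len_eq]
  have h0 := solveLoopA_eq_chk target.toList typed.toList 0 none (Nat.zero_le _)
  simp only [Nat.cast_zero, List.drop_zero] at h0
  rw [h0, chk_eq_cmp2]
  simp only [cnt, drp, le_refl, if_true, cmp2_eq_zipall]
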